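-- pv_equiv track=rewrite | github.com/pranavvb03/devops-2024 | text2sql.py | extract_sql_refinement_intent
-- ===== SOURCE A (Python) =====
-- def extract_sql_refinement_intent(question):
--     """Determine if user wants to refine previous SQL query"""
--     refinement_keywords = [
--         "modify", "change", "refine", "update", "adjust", "previous query",
--         "last query", "that query", "fix", "improve", "edit", "adapt"
--     ]
--
--     question_lower = question.lower()
--     for keyword in refinement_keywords:
--         if keyword in question_lower:
--             return True
--     return False
-- ===== SOURCE B (Python) =====
-- _REFINEMENT_KEYWORDS = [
--     "modify", "change", "refine", "update", "adjust", "previous query",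
--     "last query", "that query", "fix", "improve", "edit", "adapt"
-- ]
--
-- def extract_sql_refinement_intent(question):
--     """Determine if user wants to refine previous SQL query"""
--     q = question.lower()
--     # single left-to-right pass over the text: at each position, test whether
--     # some keyword starts there (position-major instead of keyword-major)
--     for i in range(len(q) + 1):
--         for k in _REFINEMENT_KEYWORDS:
--             if q.startswith(k, i):
--                 return True
--     return False
-- ===== Notes on version B (the rewrite author's own statement) =====
-- stated objective: alternative
-- what changed: B makes one position-major pass over the lowercased question, testing at each position whether some keyword starts there, instead of A's keyword-major loop of independent substring scans.
import Mathlib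
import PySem

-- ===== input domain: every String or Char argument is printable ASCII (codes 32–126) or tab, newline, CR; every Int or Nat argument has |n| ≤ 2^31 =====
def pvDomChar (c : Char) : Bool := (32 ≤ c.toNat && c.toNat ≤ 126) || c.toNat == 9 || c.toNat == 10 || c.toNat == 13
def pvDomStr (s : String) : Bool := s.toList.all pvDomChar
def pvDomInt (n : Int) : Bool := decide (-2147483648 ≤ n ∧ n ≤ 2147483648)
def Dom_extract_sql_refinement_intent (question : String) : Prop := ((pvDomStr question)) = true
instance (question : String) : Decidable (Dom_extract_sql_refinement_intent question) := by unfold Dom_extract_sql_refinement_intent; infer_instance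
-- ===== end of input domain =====

-- B replaces A's keyword-major loop of substring scans by one position-major pass
-- over the lowercased question, testing keyword prefixes at each position (alternative).


-- the constant keyword list (shared module constant), as lists of chars
def pvKeywords : List (List Char) :=
  ["modify".toList, "change".toList, "refine".toList, "update".toList, "adjust".toList,
   "previous query".toList, "last query".toList, "that query".toList, "fix".toList,
   "improve".toList, "edit".toList, "adapt".toList]

-- ===== PORT A =====
-- A's loop: for keyword in keywords: if keyword in question_lower: return True
def pvLoopA (q : List Char) : List (List Char) → Bool
  | [] => false
  | k :: ks => if PySem.Chars.isIn k q then true else pvLoopA q ks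

def extract_sql_refinement_intent (question : String) : Bool :=
  pvLoopA (PySem.Chars.lower question.toList) pvKeywords

-- ===== PORT B =====
-- B's pass: for each position (suffix), test whether some keyword starts there
def pvScanB : List Char → Bool
  | [] => pvKeywords.any (fun k => PySem.Chars.startswith ([] : List Char) k)
  | c :: rest =>
      if pvKeywords.any (fun k => PySem.Chars.startswith (c :: rest) k) then true
      else pvScanB rest

def extract_sql_refinement_intent_alt (question : String) : Bool :=
  pvScanB (PySem.Chars.lower question.toList)

-- ===== PRECONDITION & SPEC =====
def Spec_extract_sql_refinement_intent (question : String) (out : Bool) : Prop := out = extract_sql_refinement_intent_alt question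
instance (question : String) (out : Bool) : Decidable (Spec_extract_sql_refinement_intent question out) := by unfold Spec_extract_sql_refinement_intent; infer_instance

-- ===== CLAIM (what is proved, stated in full; the proofs are below) =====
def Claim_equal_extract_sql_refinement_intent : Prop := ∀ (question : String), Dom_extract_sql_refinement_intent question → Spec_extract_sql_refinement_intent question (extract_sql_refinement_intent question)

-- ===== LEMMAS AND PROOFS =====

theorem pvLoopA_iff (q : List Char) (ks : List (List Char)) :
    pvLoopA q ks = true ↔ ∃ k ∈ ks, PySem.Chars.isIn k q = true := by
  induction ks with
  | nil => simp [pvLoopA]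
  | cons k ks ih => by_cases h : PySem.Chars.isIn k q = true <;> simp [pvLoopA, h, ih]

theorem pvScanB_iff (s : List Char) :
    pvScanB s = true ↔ ∃ k ∈ pvKeywords, ∃ j, k <+: s.drop j := by
  induction s with
  | nil =>
    simp only [pvScanB, List.any_eq_true, PySem.Chars.startswith_iff, List.drop_nil]
    constructor
    · rintro ⟨k, hk, hp⟩; exact ⟨k, hk, 0, hp⟩
    · rintro ⟨k, hk, _, hp⟩; exact ⟨k, hk, hp⟩
  | cons c rest ih =>
    by_cases h : pvKeywords.any (fun k => PySem.Chars.startswith (c :: rest) k) = true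
    · simp only [pvScanB, h, if_true, true_iff]
      rcases List.any_eq_true.mp h with ⟨k, hk, hp⟩
      exact ⟨k, hk, 0, (PySem.Chars.startswith_iff _ _).mp hp⟩
    · rw [show pvScanB (c :: rest) = pvScanB rest by unfold pvScanB; rw [if_neg h]; cases rest <;> rfl, ih]
      constructor
      · rintro ⟨k, hk, j, hp⟩; exact ⟨k, hk, j + 1, by simpa using hp⟩
      · rintro ⟨k, hk, j, hp⟩
        cases j with
        | zero =>
          exact absurd (List.any_eq_true.mpr ⟨k, hk, (PySem.Chars.startswith_iff _ _).mpr (by simpa using hp)⟩) h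
        | succ j => exact ⟨k, hk, j, by simpa using hp⟩

-- ===== VERDICT (by name: the statement is the Claim_ definition above) =====
theorem extract_sql_refinement_intent_spec : Claim_equal_extract_sql_refinement_intent := by
  intro question _
  unfold Spec_extract_sql_refinement_intent extract_sql_refinement_intent extract_sql_refinement_intent_alt
  set q := PySem.Chars.lower question.toList
  rw [Bool.eq_iff_iff, pvLoopA_iff, pvScanB_iff]
  constructor
  · rintro ⟨k, hk, hin⟩
    rcases (PySem.Chars.exists_prefix_drop_iff_isIn k q).mpr hin with ⟨j, hj⟩
    exact ⟨k, hk, j, hj⟩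
  · rintro ⟨k, hk, j, hj⟩
    exact ⟨k, hk, (PySem.Chars.exists_prefix_drop_iff_isIn k q).mp ⟨j, hj⟩⟩
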